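-- pv_equiv track=rewrite | github.com/molejar/pyFDT | src/pyfdt/misc.py | split_to_lines
-- ===== SOURCE A (Python) =====
-- def split_to_lines(text):
--     lines = []
--     mline = str()
--     for line in text.split('\n'):
--         line = line.replace('\t', ' ')
--         line = line.rstrip('\0')
--         line = line.rstrip(' ')
--         line = line.lstrip(' ')
--         if not line or line.startswith('/dts-'):
--             continue
--         if line.endswith('{') or line.endswith(';'):
--             line = line.replace(';', '')
--             lines.append(mline + line)
--             mline = str()
--         else:
--             mline += line
--
--     return lines
-- ===== SOURCE B (Python) =====
-- def split_to_lines(text):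
--     # pass 1: normalize every raw line and keep only meaningful ones
--     cleaned = []
--     for raw in text.split('\n'):
--         c = raw.replace('\t', ' ').rstrip('\0').rstrip(' ').lstrip(' ')
--         if c and not c.startswith('/dts-'):
--             cleaned.append(c)
--     # pass 2: group cleaned lines into segments ending at a terminator ('{' or ';');
--     # an unterminated trailing segment is dropped
--     lines = []
--     i, n = 0, len(cleaned)
--     while i < n:
--         j = i
--         while j < n and not (cleaned[j].endswith('{') or cleaned[j].endswith(';')):
--             j += 1
--         if j == n:
--             break
--         lines.append(''.join(cleaned[i:j]) + cleaned[j].replace(';', ''))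
--         i = j + 1
--     return lines
-- ===== Notes on version B (the rewrite author's own statement) =====
-- stated objective: alternative
-- what changed: Replaces A's single fused loop with interleaved normalize/filter/merge state (a growing mline buffer) by two separate passes: a normalization+filter pass producing an explicit cleaned list, then a segment-grouping pass that scans for the next terminator line and joins each segment at once.
import Mathlib
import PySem

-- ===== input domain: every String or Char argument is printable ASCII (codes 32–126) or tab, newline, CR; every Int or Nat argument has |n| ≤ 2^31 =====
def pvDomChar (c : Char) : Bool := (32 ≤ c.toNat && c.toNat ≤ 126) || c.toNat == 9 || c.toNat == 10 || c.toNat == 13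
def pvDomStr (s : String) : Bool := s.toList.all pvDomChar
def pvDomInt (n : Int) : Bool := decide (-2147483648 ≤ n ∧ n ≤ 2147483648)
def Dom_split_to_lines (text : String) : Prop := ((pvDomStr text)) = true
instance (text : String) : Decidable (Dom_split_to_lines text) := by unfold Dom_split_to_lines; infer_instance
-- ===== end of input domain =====

-- B separates A's fused normalize/filter/merge loop into two passes (normalize+filter, then
-- terminator-segment grouping); same result, stated objective: alternative decomposition.


-- ===== PORT A =====
-- shared normalization helper: replace('\t',' '), rstrip('\0'), rstrip(' '), lstrip(' ')
-- (rstrip(c)/lstrip(c) for a single char are exactly reverse-dropWhile-reverse / dropWhile)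
def pvNorm (cs : List Char) : List Char :=
  let l1 := PySem.Chars.replace cs ['\t'] [' ']
  let l2 := (l1.reverse.dropWhile (· == '\u0000')).reverse
  let l3 := (l2.reverse.dropWhile (· == ' ')).reverse
  l3.dropWhile (· == ' ')

def pvStepA (st : List (List Char) × List Char) (raw : List Char) : List (List Char) × List Char :=
  let line := pvNorm raw
  if line.isEmpty || PySem.Chars.startswith line ['/', 'd', 't', 's', '-'] then st
  else if PySem.Chars.endswith line ['{'] || PySem.Chars.endswith line [';'] then
    (st.1 ++ [st.2 ++ PySem.Chars.replace line [';'] []], [])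
  else (st.1, st.2 ++ line)

def split_to_lines (text : String) : List String :=
  (((PySem.Chars.splitOn text.toList ['\n']).foldl pvStepA ([], [])).1).map String.ofList

-- ===== PORT B =====
def pvKeep (cs : List Char) : Bool :=
  !(cs.isEmpty || PySem.Chars.startswith cs ['/', 'd', 't', 's', '-'])

def pvTerm (cs : List Char) : Bool :=
  PySem.Chars.endswith cs ['{'] || PySem.Chars.endswith cs [';']

-- pass 2 of B: scan to the next terminator line (python's inner while = takeWhile/dropWhile),
-- emit the joined segment (''.join = flatten) with ';' removed from the terminator, recurse on the rest
def pvMerge (cs : List (List Char)) : List (List Char) :=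
  let rest := cs.dropWhile (fun c => !pvTerm c)
  if hr : rest = [] then []
  else ((cs.takeWhile (fun c => !pvTerm c)).flatten ++ PySem.Chars.replace (rest.head hr) [';'] []) ::
    pvMerge rest.tail
termination_by cs.length
decreasing_by
  have hle := List.length_dropWhile_le (p := fun c => !pvTerm c) (l := cs)
  have hne : (cs.dropWhile (fun c => !pvTerm c)).length ≠ 0 := by
    intro h0; exact hr (List.length_eq_zero_iff.mp h0)
  simp only [List.length_tail]
  omega

def split_to_lines_alt (text : String) : List String :=
  (pvMerge (((PySem.Chars.splitOn text.toList ['\n']).map pvNorm).filter pvKeep)).map String.ofList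

-- ===== PRECONDITION & SPEC =====
def Spec_split_to_lines (text : String) (out : List String) : Prop := out = split_to_lines_alt text
instance (text : String) (out : List String) : Decidable (Spec_split_to_lines text out) := by unfold Spec_split_to_lines; infer_instance

-- ===== CLAIM (what is proved, stated in full; the proofs are below) =====
def Claim_equal_split_to_lines : Prop := ∀ (text : String), Dom_split_to_lines text → Spec_split_to_lines text (split_to_lines text)

-- ===== LEMMAS AND PROOFS =====

-- merge-only step of A's loop (proof-side object relating A's fold to pvMerge)
def pvStepM (st : List (List Char) × List Char) (line : List Char) : List (List Char) × List Char :=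
  if pvTerm line then (st.1 ++ [st.2 ++ PySem.Chars.replace line [';'] []], [])
  else (st.1, st.2 ++ line)

-- prepend a buffer onto the first emitted segment (nothing if no segment is ever emitted)
def pvPre (b : List Char) : List (List Char) → List (List Char)
  | [] => []
  | s :: tl => (b ++ s) :: tl

lemma pvStepA_eq (st : List (List Char) × List Char) (raw : List Char) :
    pvStepA st raw = if pvKeep (pvNorm raw) then pvStepM st (pvNorm raw) else st := by
  simp only [pvStepA, pvStepM, pvKeep, pvTerm]
  by_cases h : ((pvNorm raw).isEmpty || PySem.Chars.startswith (pvNorm raw) ['/', 'd', 't', 's', '-']) = true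
  · simp [h]
  · simp only [Bool.not_eq_true] at h
    simp [h]

lemma pvMerge_nil : pvMerge [] = [] := by
  unfold pvMerge; rfl

lemma pvPre_nil (xs : List (List Char)) : pvPre [] xs = xs := by
  cases xs <;> simp [pvPre]

lemma pvMerge_cons_term (c : List Char) (cs : List (List Char)) (h : pvTerm c = true) :
    pvMerge (c :: cs) = PySem.Chars.replace c [';'] [] :: pvMerge cs := by
  conv_lhs => unfold pvMerge
  simp [h]

lemma pvPre_append (b c : List Char) (xs : List (List Char)) :
    pvPre (b ++ c) xs = pvPre b (pvPre c xs) := by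
  cases xs <;> simp [pvPre, List.append_assoc]

lemma pvMerge_cons_nonterm (c : List Char) (cs : List (List Char)) (h : pvTerm c = false) :
    pvMerge (c :: cs) = pvPre c (pvMerge cs) := by
  have hrhs : pvMerge cs =
      (match cs.dropWhile (fun c => !pvTerm c) with
        | [] => ([] : List (List Char))
        | t :: tl => ((cs.takeWhile (fun c => !pvTerm c)).flatten ++ PySem.Chars.replace t [';'] []) :: pvMerge tl) := by
    conv_lhs => unfold pvMerge
    rcases hd : cs.dropWhile (fun c => !pvTerm c) with _ | ⟨t, tl⟩ <;> simp
  conv_lhs => unfold pvMerge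
  rcases hd : cs.dropWhile (fun c => !pvTerm c) with _ | ⟨t, tl⟩
  · simp [h, hd, hrhs, pvPre]
  · simp [h, hd, hrhs, pvPre, List.append_assoc]

lemma foldM_merge (cs : List (List Char)) :
    ∀ (acc : List (List Char)) (buf : List Char),
      (cs.foldl pvStepM (acc, buf)).1 = acc ++ pvPre buf (pvMerge cs) := by
  induction cs with
  | nil => intro acc buf; simp [pvMerge_nil, pvPre]
  | cons c cs ih =>
      intro acc buf
      cases h : pvTerm c with
      | true =>
          rw [pvMerge_cons_term c cs h]
          simp only [List.foldl_cons, pvStepM, h, if_pos]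
          rw [ih, pvPre_nil]
          simp [pvPre, List.append_assoc]
      | false =>
          rw [pvMerge_cons_nonterm c cs h]
          simp only [List.foldl_cons, pvStepM, h, Bool.false_eq_true, if_neg, not_false_iff]
          rw [ih, pvPre_append]

lemma foldA_eq (ls : List (List Char)) (acc : List (List Char)) (buf : List Char) :
    ls.foldl pvStepA (acc, buf) = ((ls.map pvNorm).filter pvKeep).foldl pvStepM (acc, buf) := by
  induction ls generalizing acc buf with
  | nil => rfl
  | cons l ls ih =>
      simp only [List.map_cons, List.filter_cons, List.foldl_cons, pvStepA_eq]
      cases h : pvKeep (pvNorm l) with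
      | false => simp only [Bool.false_eq_true, if_neg, not_false_iff]; exact ih acc buf
      | true =>
          simp only [if_pos, List.foldl_cons]
          rcases hst : pvStepM (acc, buf) (pvNorm l) with ⟨a, b⟩
          exact ih a b

-- ===== VERDICT (by name: the statement is the Claim_ definition above) =====
theorem split_to_lines_spec : Claim_equal_split_to_lines := by
  intro text _
  unfold Spec_split_to_lines split_to_lines split_to_lines_alt
  rw [foldA_eq, foldM_merge, pvPre_nil]
  simp
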